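-- pv_equiv track=rewrite | github.com/Bhargavipai03/SelfTherapyChatbot | chatbot_core.py | preprocess_message
-- ===== SOURCE A (Python) =====
-- def preprocess_message(message):
--     """Clean and preprocess the message for better classification"""
--     # Convert to lowercase
--     message = message.lower().strip()
--
--     # Handle common contractions
--     contractions = {
--         "i'm": "i am",
--         "i've": "i have",
--         "i'll": "i will",
--         "i'd": "i would",
--         "can't": "cannot",
--         "won't": "will not",
--         "don't": "do not",
--         "doesn't": "does not",
--         "isn't": "is not",
--         "aren't": "are not",
--         "wasn't": "was not",
--         "weren't": "were not",
--         "haven't": "have not",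
--         "hasn't": "has not",
--         "hadn't": "had not",
--         "wouldn't": "would not",
--         "shouldn't": "should not",
--         "couldn't": "could not"
--     }
--
--     for contraction, expansion in contractions.items():
--         message = message.replace(contraction, expansion)
--
--     return message
-- ===== SOURCE B (Python) =====
-- def preprocess_message(message):
--     """Clean and preprocess the message for better classification."""
--     message = message.lower().strip()
--     pairs = [
--         ("i'm", "i am"), ("i've", "i have"), ("i'll", "i will"), ("i'd", "i would"),
--         ("can't", "cannot"), ("won't", "will not"), ("don't", "do not"),
--         ("doesn't", "does not"), ("isn't", "is not"), ("aren't", "are not"),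
--         ("wasn't", "was not"), ("weren't", "were not"), ("haven't", "have not"),
--         ("hasn't", "has not"), ("hadn't", "had not"), ("wouldn't", "would not"),
--         ("shouldn't", "should not"), ("couldn't", "could not"),
--     ]
--     out = []
--     buf = message
--     while buf:
--         for contraction, expansion in pairs:
--             if buf.startswith(contraction):
--                 # splice the expansion in and keep scanning from its start
--                 buf = expansion + buf[len(contraction):]
--                 break
--         else:
--             out.append(buf[0])
--             buf = buf[1:]
--     return ''.join(out)
-- ===== Notes on version B (the rewrite author's own statement) =====
-- stated objective: alternative
-- what changed: replaces the 18 sequential whole-string replace() passes by a single left-to-right scan that splices in the expansion of the leftmost matching contraction and continues scanning from the spliced text, traversing the message once instead of 18 times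
import Mathlib
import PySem

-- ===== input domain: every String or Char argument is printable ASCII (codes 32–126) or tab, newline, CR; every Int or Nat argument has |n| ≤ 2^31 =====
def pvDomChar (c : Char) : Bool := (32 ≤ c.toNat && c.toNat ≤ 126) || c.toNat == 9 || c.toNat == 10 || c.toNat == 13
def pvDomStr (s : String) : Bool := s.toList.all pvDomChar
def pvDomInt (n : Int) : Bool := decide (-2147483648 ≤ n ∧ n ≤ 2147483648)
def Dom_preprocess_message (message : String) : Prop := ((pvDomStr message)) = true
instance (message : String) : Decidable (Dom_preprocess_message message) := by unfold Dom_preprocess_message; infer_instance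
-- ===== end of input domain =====

-- ===== PORT A =====
-- B rewrites A's 18 sequential replace passes as one left-to-right rescanning pass (alternative
-- decomposition, same exact behaviour); the equivalence below is proved for every input string.
-- A's contractions dict, as an association list in insertion order:
def pvContractionsA : List (String × String) := [
  ("i'm", "i am"),
  ("i've", "i have"),
  ("i'll", "i will"),
  ("i'd", "i would"),
  ("can't", "cannot"),
  ("won't", "will not"),
  ("don't", "do not"),
  ("doesn't", "does not"),
  ("isn't", "is not"),
  ("aren't", "are not"),
  ("wasn't", "was not"),
  ("weren't", "were not"),
  ("haven't", "have not"),
  ("hasn't", "has not"),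
  ("hadn't", "had not"),
  ("wouldn't", "would not"),
  ("shouldn't", "should not"),
  ("couldn't", "could not")]

-- port of A: message = message.lower().strip(); then one str.replace pass per dict item, in order
def preprocess_message (message : String) : String :=
  pvContractionsA.foldl (fun acc p => PySem.Str.replace acc p.1 p.2)
    (PySem.Str.strip (PySem.Str.lower message))

-- ===== PORT B =====
-- Source B's `pairs` table, at the character-list level (Python str ~ List Char):
def pvPairsC : List (List Char × List Char) := [
  (['i', '\'', 'm'], ['i', ' ', 'a', 'm']),
  (['i', '\'', 'v', 'e'], ['i', ' ', 'h', 'a', 'v', 'e']),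
  (['i', '\'', 'l', 'l'], ['i', ' ', 'w', 'i', 'l', 'l']),
  (['i', '\'', 'd'], ['i', ' ', 'w', 'o', 'u', 'l', 'd']),
  (['c', 'a', 'n', '\'', 't'], ['c', 'a', 'n', 'n', 'o', 't']),
  (['w', 'o', 'n', '\'', 't'], ['w', 'i', 'l', 'l', ' ', 'n', 'o', 't']),
  (['d', 'o', 'n', '\'', 't'], ['d', 'o', ' ', 'n', 'o', 't']),
  (['d', 'o', 'e', 's', 'n', '\'', 't'], ['d', 'o', 'e', 's', ' ', 'n', 'o', 't']),
  (['i', 's', 'n', '\'', 't'], ['i', 's', ' ', 'n', 'o', 't']),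
  (['a', 'r', 'e', 'n', '\'', 't'], ['a', 'r', 'e', ' ', 'n', 'o', 't']),
  (['w', 'a', 's', 'n', '\'', 't'], ['w', 'a', 's', ' ', 'n', 'o', 't']),
  (['w', 'e', 'r', 'e', 'n', '\'', 't'], ['w', 'e', 'r', 'e', ' ', 'n', 'o', 't']),
  (['h', 'a', 'v', 'e', 'n', '\'', 't'], ['h', 'a', 'v', 'e', ' ', 'n', 'o', 't']),
  (['h', 'a', 's', 'n', '\'', 't'], ['h', 'a', 's', ' ', 'n', 'o', 't']),
  (['h', 'a', 'd', 'n', '\'', 't'], ['h', 'a', 'd', ' ', 'n', 'o', 't']),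
  (['w', 'o', 'u', 'l', 'd', 'n', '\'', 't'], ['w', 'o', 'u', 'l', 'd', ' ', 'n', 'o', 't']),
  (['s', 'h', 'o', 'u', 'l', 'd', 'n', '\'', 't'], ['s', 'h', 'o', 'u', 'l', 'd', ' ', 'n', 'o', 't']),
  (['c', 'o', 'u', 'l', 'd', 'n', '\'', 't'], ['c', 'o', 'u', 'l', 'd', ' ', 'n', 'o', 't'])]

-- Source B's inner `for`: first pair whose contraction starts the buffer
def pvMatch : List (List Char × List Char) → List Char → Option (List Char × List Char)
  | [], _ => none
  | p :: ps, buf => if p.1.isPrefixOf buf then some p else pvMatch ps buf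

-- termination measure for the rescanning loop: each step removes a char or an apostrophe
def pvMeasure (l : List Char) : Nat := l.length + 5 * l.count '\''

-- (termination helpers for pvScanG; cited in its decreasing_by)
theorem pvMatch_spec : ∀ (ps : List (List Char × List Char)) (buf : List Char) p,
    pvMatch ps buf = some p → p ∈ ps ∧ p.1 <+: buf := by
  intro ps
  induction ps with
  | nil => intro buf p h; simp [pvMatch] at h
  | cons q ps ih =>
    intro buf p h
    by_cases hq : q.1.isPrefixOf buf
    · simp [pvMatch, hq] at h; subst h
      exact ⟨by simp, List.isPrefixOf_iff_prefix.mp hq⟩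
    · simp [pvMatch, hq] at h
      obtain ⟨h1, h2⟩ := ih buf p h
      exact ⟨List.mem_cons_of_mem _ h1, h2⟩

theorem pvGood_all : ∀ p ∈ pvPairsC,
    p.1 ≠ [] ∧ p.1.count '\'' = 1 ∧ p.2.count '\'' = 0 ∧ p.2.length < p.1.length + 5 := by
  decide

theorem pvMeasure_app {k e : List Char} (r : List Char) (h1 : k.count '\'' = 1)
    (h0 : e.count '\'' = 0) (hl : e.length < k.length + 5) :
    pvMeasure (e ++ r) < pvMeasure (k ++ r) := by
  simp [pvMeasure, List.count_append, h1, h0]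
  omega

theorem pvMeasure_tail {c : Char} {t : List Char} : pvMeasure t < pvMeasure (c :: t) := by
  simp [pvMeasure, List.count_cons]
  split <;> omega

-- Source B's `while buf:` loop over the first n pairs of the table (Source B itself runs it with all
-- 18 pairs, i.e. n = pvPairsC.length; the proofs below peel the table one pair at a time)
def pvScanG (n : Nat) (buf : List Char) : List Char :=
  match hm : pvMatch (pvPairsC.take n) buf with
  | some p => pvScanG n (p.2 ++ buf.drop p.1.length)
  | none =>
    match buf with
    | [] => []
    | c :: t => c :: pvScanG n t
termination_by pvMeasure buf
decreasing_by
  · obtain ⟨hmem, hpre⟩ := pvMatch_spec _ _ _ hm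
    have hg := pvGood_all p (List.mem_of_mem_take hmem)
    obtain ⟨r, hr⟩ := hpre
    rw [← hr, List.drop_left]
    exact pvMeasure_app r hg.2.1 hg.2.2.1 hg.2.2.2
  · exact pvMeasure_tail

-- port of B: lower, strip, then the single rescanning pass, rebuilding the string at the end
def preprocess_message_alt (message : String) : String :=
  String.ofList (pvScanG pvPairsC.length (PySem.Str.strip (PySem.Str.lower message)).toList)

-- ===== PRECONDITION & SPEC =====
def Spec_preprocess_message (message : String) (out : String) : Prop := out = preprocess_message_alt message
instance (message : String) (out : String) : Decidable (Spec_preprocess_message message out) := by unfold Spec_preprocess_message; infer_instance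

-- ===== CLAIM (what is proved, stated in full; the proofs are below) =====
def Claim_equal_preprocess_message : Prop := ∀ (message : String), Dom_preprocess_message message → Spec_preprocess_message message (preprocess_message message)

-- ===== LEMMAS AND PROOFS =====

-- structural form of one CPython str.replace pass (old ≠ ''): used to re-express port A's passes
def pvRep (k e : List Char) : List Char → List Char
  | [] => []
  | c :: t =>
    if h : k ≠ [] ∧ k.isPrefixOf (c :: t) then e ++ pvRep k e ((c :: t).drop k.length)
    else c :: pvRep k e t
termination_by s => s.length
decreasing_by
  · have hk1 : 0 < k.length := by
      cases hk : k with
      | nil => exact absurd hk h.1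
      | cons a l => simp
    simp only [List.length_drop, List.length_cons]
    omega
  · simp

theorem pvRep_nil (k e : List Char) : pvRep k e [] = [] := by rw [pvRep]

theorem pvRep_cons_neg {k : List Char} (e : List Char) {c : Char} {t : List Char}
    (h : ¬ k <+: (c :: t)) : pvRep k e (c :: t) = c :: pvRep k e t := by
  rw [pvRep, dif_neg]
  intro hand
  exact h (List.isPrefixOf_iff_prefix.mp hand.2)

theorem pvRep_head {k : List Char} (e : List Char) (hk : k ≠ []) (x : List Char) :
    pvRep k e (k ++ x) = e ++ pvRep k e x := by
  cases k with
  | nil => exact absurd rfl hk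
  | cons a k' =>
    have hcond : (a :: k') ≠ [] ∧ (a :: k').isPrefixOf (a :: (k' ++ x)) := by
      refine ⟨by simp, List.isPrefixOf_iff_prefix.mpr ?_⟩
      exact ⟨x, by simp⟩
    rw [List.cons_append, pvRep, dif_pos hcond]
    congr 1
    simp only [List.length_cons, List.drop_succ_cons, List.drop_left]

theorem pvRep_prepend (k e : List Char) :
    ∀ (u z : List Char), (∀ i < u.length, ¬ k <+: (u.drop i ++ z)) →
      pvRep k e (u ++ z) = u ++ pvRep k e z := by
  intro u
  induction u with
  | nil => intro z _; simp
  | cons c u' ih =>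
    intro z h
    have h0 : ¬ k <+: (c :: (u' ++ z)) := by simpa using h 0 (by simp)
    rw [List.cons_append, pvRep_cons_neg e h0]
    rw [ih z (fun i hi => by simpa using h (i + 1) (by simpa using hi))]
    simp

theorem pvMatch_none_iff {ps : List (List Char × List Char)} {buf : List Char} :
    pvMatch ps buf = none ↔ ∀ p ∈ ps, ¬ p.1 <+: buf := by
  induction ps with
  | nil => simp [pvMatch]
  | cons q ps ih =>
    cases hq : q.1.isPrefixOf buf
    · have hq' : ¬ q.1 <+: buf := fun hc => by
        rw [← List.isPrefixOf_iff_prefix, hq] at hc; cases hc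
      simp [pvMatch, hq, List.forall_mem_cons, ih, hq']
    · have hq' : q.1 <+: buf := List.isPrefixOf_iff_prefix.mp hq
      simp [pvMatch, hq, List.forall_mem_cons, hq']

theorem pvMatch_append_some {ps qs : List (List Char × List Char)} {buf : List Char} {p}
    (h : pvMatch ps buf = some p) : pvMatch (ps ++ qs) buf = some p := by
  induction ps with
  | nil => simp [pvMatch] at h
  | cons q ps ih =>
    cases hq : q.1.isPrefixOf buf
    · simp only [List.cons_append, pvMatch, hq, Bool.false_eq_true, if_false] at h ⊢
      exact ih h
    · simp only [List.cons_append, pvMatch, hq, if_true] at h ⊢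
      exact h

theorem pvMatch_append_none {ps qs : List (List Char × List Char)} {buf : List Char}
    (h : pvMatch ps buf = none) : pvMatch (ps ++ qs) buf = pvMatch qs buf := by
  induction ps with
  | nil => rfl
  | cons q ps ih =>
    cases hq : q.1.isPrefixOf buf
    · simp only [List.cons_append, pvMatch, hq, Bool.false_eq_true, if_false] at h ⊢
      exact ih h
    · simp only [pvMatch, hq, if_true] at h
      cases h

theorem pvScanG_eq_match {n : Nat} {buf : List Char} {p}
    (h : pvMatch (pvPairsC.take n) buf = some p) :
    pvScanG n buf = pvScanG n (p.2 ++ buf.drop p.1.length) := by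
  rw [pvScanG]
  split
  · rename_i p' hm
    rw [h] at hm
    injection hm with h2
    rw [h2]
  · rename_i hm
    rw [h] at hm
    cases hm

theorem pvScanG_eq_skip {n : Nat} {c : Char} {t : List Char}
    (h : pvMatch (pvPairsC.take n) (c :: t) = none) :
    pvScanG n (c :: t) = c :: pvScanG n t := by
  rw [pvScanG]
  split
  · rename_i p' hm
    rw [h] at hm
    cases hm
  · rfl

theorem pvScanG_nil (n : Nat) : pvScanG n [] = [] := by
  rw [pvScanG]
  split
  · rename_i p hm
    obtain ⟨hmem, hpre⟩ := pvMatch_spec _ _ _ hm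
    have hne := (pvGood_all p (List.mem_of_mem_take hmem)).1
    rw [List.prefix_nil] at hpre
    exact (hne hpre).elim
  · rfl

theorem pvScanG_zero : ∀ t, pvScanG 0 t = t := by
  intro t
  induction t with
  | nil => exact pvScanG_nil 0
  | cons c t ih => rw [pvScanG_eq_skip rfl, ih]

theorem pvScanG_prepend {n : Nat} :
    ∀ u r, (∀ i < u.length, pvMatch (pvPairsC.take n) (u.drop i ++ r) = none) →
      pvScanG n (u ++ r) = u ++ pvScanG n r := by
  intro u
  induction u with
  | nil => intro r _; simp
  | cons c u' ih =>
    intro r h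
    have h0 : pvMatch (pvPairsC.take n) (c :: (u' ++ r)) = none := by simpa using h 0 (by simp)
    rw [List.cons_append, pvScanG_eq_skip h0]
    rw [ih r (fun i hi => by simpa using h (i + 1) (by simpa using hi))]
    simp

-- all suffixes of key tails: the shapes the reflection lemma tracks through the scan output
def pvV : List (List Char) := (pvPairsC.map (fun p => p.1.tail)).flatMap List.tails

theorem pvV_tail : ∀ v ∈ pvV, List.tail v ∈ pvV := by decide

theorem pvV_keytail : ∀ p ∈ pvPairsC, p.1.tail ∈ pvV := by decide

-- no expansion is a prefix of a tracked shape, and a tracked shape that starts an expansion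
-- also starts that pair's contraction (the shapes all carry an apostrophe, expansions none)
theorem pvCC : ∀ v ∈ pvV, ∀ p ∈ pvPairsC, ¬ p.2 <+: v ∧ (v <+: p.2 → v <+: p.1) := by decide

-- a proper suffix of a key never aligns with an earlier key (in either prefix direction)
theorem pvSideK : ∀ j : Fin pvPairsC.length, ∀ i < (pvPairsC.get j).1.length, 1 ≤ i →
    ∀ p ∈ pvPairsC.take j.1,
      ¬ ((pvPairsC.get j).1.drop i <+: p.1) ∧ ¬ (p.1 <+: (pvPairsC.get j).1.drop i) := by decide

-- no suffix of an expansion aligns with an earlier key, nor with its own key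
theorem pvSideE : ∀ j : Fin pvPairsC.length, ∀ i < (pvPairsC.get j).2.length,
    (∀ p ∈ pvPairsC.take j.1,
      ¬ ((pvPairsC.get j).2.drop i <+: p.1) ∧ ¬ (p.1 <+: (pvPairsC.get j).2.drop i))
    ∧ ¬ ((pvPairsC.get j).2.drop i <+: (pvPairsC.get j).1)
    ∧ ¬ ((pvPairsC.get j).1 <+: (pvPairsC.get j).2.drop i) := by decide

theorem pvNoPre {u k' : List Char} (r : List Char) (h1 : ¬ u <+: k') (h2 : ¬ k' <+: u) :
    ¬ k' <+: u ++ r :=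
  fun h => (List.prefix_or_prefix_of_prefix h (List.prefix_append u r)).elim h2 h1

-- reflection: a tracked shape that prefixes the scan's output already prefixed its input
theorem pvRefl_aux : ∀ m, ∀ w : List Char, pvMeasure w ≤ m →
    ∀ v ∈ pvV, ∀ n : Nat, v <+: pvScanG n w → v <+: w := by
  intro m
  induction m with
  | zero =>
    intro w hw v hv n hpre
    have hwnil : w = [] := by
      cases w with
      | nil => rfl
      | cons c t => simp [pvMeasure] at hw
    subst hwnil
    rwa [pvScanG_nil] at hpre
  | succ m ih =>
    intro w hw v hv n hpre
    cases hm : pvMatch (pvPairsC.take n) w with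
    | some p =>
      obtain ⟨hmem, hkpre⟩ := pvMatch_spec _ _ _ hm
      have hmemP := List.mem_of_mem_take hmem
      have hg := pvGood_all p hmemP
      obtain ⟨r, hr⟩ := hkpre
      rw [pvScanG_eq_match hm, ← hr, List.drop_left] at hpre
      have hm2 : pvMeasure (p.2 ++ r) ≤ m := by
        have hlt := pvMeasure_app r hg.2.1 hg.2.2.1 hg.2.2.2
        rw [hr] at hlt
        omega
      have hv2 : v <+: p.2 ++ r := ih (p.2 ++ r) hm2 v hv n hpre
      have hcc := pvCC v hv p hmemP
      rw [← hr]
      rcases List.prefix_or_prefix_of_prefix hv2 (List.prefix_append p.2 r) with hcase | hcase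
      · exact (hcc.2 hcase).trans (List.prefix_append p.1 r)
      · exact absurd hcase hcc.1
    | none =>
      cases w with
      | nil => rwa [pvScanG_nil] at hpre
      | cons c w' =>
        rw [pvScanG_eq_skip hm] at hpre
        cases v with
        | nil => simp
        | cons a v' =>
          rw [List.cons_prefix_cons] at hpre
          have hv' : v' ∈ pvV := by simpa using pvV_tail _ hv
          have hw' : pvMeasure w' ≤ m := by
            have := pvMeasure_tail (c := c) (t := w')
            omega
          exact List.cons_prefix_cons.mpr ⟨hpre.1, ih w' hw' v' hv' n hpre.2⟩

theorem pv_take_succ (j : Fin pvPairsC.length) :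
    pvPairsC.take (j.1 + 1) = pvPairsC.take j.1 ++ [pvPairsC.get j] := by
  rw [List.take_succ]
  simp [List.getElem?_eq_getElem j.2, List.get_eq_getElem]

-- one replace pass applied to the scan over the first j pairs gives the scan over j+1 pairs
theorem pvPass_aux (j : Fin pvPairsC.length) : ∀ m, ∀ t, pvMeasure t ≤ m →
    pvRep (pvPairsC.get j).1 (pvPairsC.get j).2 (pvScanG j.1 t) = pvScanG (j.1 + 1) t := by
  intro m
  induction m with
  | zero =>
    intro t ht
    have hnil : t = [] := by
      cases t with
      | nil => rfl
      | cons c t' => simp [pvMeasure] at ht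
    subst hnil
    rw [pvScanG_nil, pvScanG_nil, pvRep_nil]
  | succ m ih =>
    intro t ht
    cases hm : pvMatch (pvPairsC.take j.1) t with
    | some p =>
      obtain ⟨hmem, hkpre⟩ := pvMatch_spec _ _ _ hm
      have hg := pvGood_all p (List.mem_of_mem_take hmem)
      obtain ⟨r, hr⟩ := hkpre
      have hm' : pvMatch (pvPairsC.take (j.1 + 1)) t = some p := by
        rw [pv_take_succ j]
        exact pvMatch_append_some hm
      rw [pvScanG_eq_match hm, pvScanG_eq_match hm', ← hr, List.drop_left]
      refine ih (p.2 ++ r) ?_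
      have hlt := pvMeasure_app r hg.2.1 hg.2.2.1 hg.2.2.2
      rw [hr] at hlt
      omega
    | none =>
      cases t with
      | nil => rw [pvScanG_nil, pvScanG_nil, pvRep_nil]
      | cons c t' =>
        have hgj := pvGood_all (pvPairsC.get j) (List.get_mem pvPairsC j)
        by_cases hK : (pvPairsC.get j).1 <+: (c :: t')
        · obtain ⟨r, hr⟩ := hK
          have hnomK : ∀ i < (pvPairsC.get j).1.length,
              pvMatch (pvPairsC.take j.1) ((pvPairsC.get j).1.drop i ++ r) = none := by
            intro i hi
            rcases Nat.eq_zero_or_pos i with h0 | h1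
            · subst h0
              rw [List.drop_zero, hr]
              exact hm
            · rw [pvMatch_none_iff]
              intro q hq
              have hd := pvSideK j i hi h1 q hq
              exact pvNoPre r hd.1 hd.2
          have h2 : pvScanG j.1 ((pvPairsC.get j).1 ++ r)
              = (pvPairsC.get j).1 ++ pvScanG j.1 r := pvScanG_prepend _ _ hnomK
          have hnomE : ∀ i < (pvPairsC.get j).2.length,
              pvMatch (pvPairsC.take j.1) ((pvPairsC.get j).2.drop i ++ r) = none := by
            intro i hi
            rw [pvMatch_none_iff]
            intro q hq
            have hd := (pvSideE j i hi).1 q hq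
            exact pvNoPre r hd.1 hd.2
          have h4 : pvScanG j.1 ((pvPairsC.get j).2 ++ r)
              = (pvPairsC.get j).2 ++ pvScanG j.1 r := pvScanG_prepend _ _ hnomE
          have hm' : pvMatch (pvPairsC.take (j.1 + 1)) (c :: t') = some (pvPairsC.get j) := by
            rw [pv_take_succ j, pvMatch_append_none hm]
            have hpb : (pvPairsC.get j).1.isPrefixOf (c :: t') = true :=
              List.isPrefixOf_iff_prefix.mpr ⟨r, hr⟩
            rw [pvMatch, if_pos hpb]
          rw [pvScanG_eq_match hm', ← hr, List.drop_left, h2, pvRep_head _ hgj.1]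
          have hE : pvMeasure ((pvPairsC.get j).2 ++ r) ≤ m := by
            have hlt := pvMeasure_app r hgj.2.1 hgj.2.2.1 hgj.2.2.2
            rw [hr] at hlt
            omega
          rw [← ih _ hE, h4]
          rw [pvRep_prepend _ _ _ _
            (fun i hi => pvNoPre (pvScanG j.1 r) (pvSideE j i hi).2.1 (pvSideE j i hi).2.2)]
        · have hm' : pvMatch (pvPairsC.take (j.1 + 1)) (c :: t') = none := by
            rw [pv_take_succ j, pvMatch_append_none hm]
            cases hb : (pvPairsC.get j).1.isPrefixOf (c :: t')
            · rw [pvMatch, if_neg (by rw [hb]; simp)]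
              rfl
            · exact absurd (List.isPrefixOf_iff_prefix.mp hb) hK
          rw [pvScanG_eq_skip hm, pvScanG_eq_skip hm']
          have hnp : ¬ (pvPairsC.get j).1 <+: (c :: pvScanG j.1 t') := by
            intro hcon
            cases hKs : (pvPairsC.get j).1 with
            | nil => exact hgj.1 hKs
            | cons a K' =>
              rw [hKs, List.cons_prefix_cons] at hcon
              have hKV : K' ∈ pvV := by
                have := pvV_keytail _ (List.get_mem pvPairsC j)
                rw [hKs] at this
                simpa using this
              have hK't' := pvRefl_aux (pvMeasure t') t' le_rfl K' hKV j.1 hcon.2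
              exact hK (by rw [hKs]; exact List.cons_prefix_cons.mpr ⟨hcon.1, hK't'⟩)
          rw [pvRep_cons_neg _ hnp]
          rw [ih t' (by have := pvMeasure_tail (c := c) (t := t'); omega)]

theorem pvPass (j : Fin pvPairsC.length) (t : List Char) :
    pvRep (pvPairsC.get j).1 (pvPairsC.get j).2 (pvScanG j.1 t) = pvScanG (j.1 + 1) t :=
  pvPass_aux j (pvMeasure t) t le_rfl

-- folding the passes for the first j pairs equals the scan over the first j pairs
theorem pvChain : ∀ j, j ≤ pvPairsC.length → ∀ t,
    (pvPairsC.take j).foldl (fun acc p => pvRep p.1 p.2 acc) t = pvScanG j t := by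
  intro j
  induction j with
  | zero => intro _ t; simpa using (pvScanG_zero t).symm
  | succ j ihj =>
    intro hj t
    have hjlt : j < pvPairsC.length := by omega
    rw [pv_take_succ ⟨j, hjlt⟩, List.foldl_append]
    simp only [List.foldl_cons, List.foldl_nil]
    rw [ihj (by omega) t]
    exact pvPass ⟨j, hjlt⟩ t

-- CPython str.replace (old ≠ '') is pvRep
theorem pvGo_eq (k e : List Char) (hk : k ≠ []) :
    ∀ fuel (l acc : List Char), l.length ≤ fuel →
      PySem.Chars.replace.go k e fuel l acc = acc.reverse ++ pvRep k e l := by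
  have hk1 : 0 < k.length := by
    cases hke : k with
    | nil => exact absurd hke hk
    | cons a l => simp
  intro fuel
  induction fuel with
  | zero =>
    intro l acc hl
    have hln : l = [] := by
      cases l with
      | nil => rfl
      | cons a b => simp at hl
    subst hln
    rw [PySem.Chars.replace.go]
    all_goals simp [pvRep_nil]
  | succ fuel ihf =>
    intro l acc hl
    cases l with
    | nil =>
      rw [PySem.Chars.replace.go]
      all_goals simp [pvRep_nil]
    | cons c t =>
      rw [PySem.Chars.replace.go]
      cases hp : k.isPrefixOf (c :: t)
      · simp only [hp, Bool.false_eq_true, if_false]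
        have hnp : ¬ k <+: (c :: t) := fun hc => by
          rw [← List.isPrefixOf_iff_prefix, hp] at hc
          cases hc
        rw [ihf t (c :: acc) (by simp only [List.length_cons] at hl; omega)]
        rw [pvRep_cons_neg e hnp]
        simp
      · simp only [hp, if_true]
        obtain ⟨r, hr⟩ := List.isPrefixOf_iff_prefix.mp hp
        have hrl : k.length + r.length = t.length + 1 := by
          have hlen := congrArg List.length hr
          simpa using hlen
        rw [← hr, List.drop_left, pvRep_head e hk]
        rw [ihf r (e.reverse ++ acc) (by simp only [List.length_cons] at hl; omega)]
        simp

theorem pvReplace_eq (s k e : List Char) (hk : k ≠ []) :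
    PySem.Chars.replace s k e = pvRep k e s := by
  have hie : ¬ (k.isEmpty = true) := fun hie => hk (List.isEmpty_iff.mp hie)
  rw [PySem.Chars.replace, if_neg hie]
  simpa using pvGo_eq k e hk s.length s [] le_rfl

theorem pvFold_replace_eq :
    ∀ (ps : List (List Char × List Char)), (∀ p ∈ ps, p.1 ≠ []) → ∀ t,
      ps.foldl (fun acc p => PySem.Chars.replace acc p.1 p.2) t
        = ps.foldl (fun acc p => pvRep p.1 p.2 acc) t := by
  intro ps
  induction ps with
  | nil => intro _ t; rfl
  | cons q ps ih =>
    intro h t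
    simp only [List.foldl_cons]
    rw [pvReplace_eq t q.1 q.2 (h q (by simp))]
    exact ih (fun p hp => h p (by simp [hp])) _

theorem pvStrFold (ps : List (String × String)) :
    ∀ (s : String), (ps.foldl (fun a p => PySem.Str.replace a p.1 p.2) s).toList
      = (ps.map (fun p => (p.1.toList, p.2.toList))).foldl
          (fun a q => PySem.Chars.replace a q.1 q.2) s.toList := by
  induction ps with
  | nil => intro s; simp
  | cons q ps ih =>
    intro s
    simp only [List.foldl_cons, List.map_cons]
    rw [ih, PySem.Str.toList_replace]

theorem pvMapAC : pvContractionsA.map (fun p => (p.1.toList, p.2.toList)) = pvPairsC := by decide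

-- ===== VERDICT (by name: the statement is the Claim_ definition above) =====
theorem preprocess_message_spec : Claim_equal_preprocess_message := by
  unfold Claim_equal_preprocess_message Spec_preprocess_message
  intro message _
  refine String.toList_inj.mp ?_
  unfold preprocess_message preprocess_message_alt
  rw [pvStrFold, pvMapAC, pvFold_replace_eq _ (fun p hp => (pvGood_all p hp).1)]
  rw [String.toList_ofList]
  have hchain := pvChain pvPairsC.length le_rfl ((PySem.Str.strip (PySem.Str.lower message)).toList)
  rw [List.take_length] at hchain
  exact hchain
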